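-- pv_equiv track=rewrite | github.com/tzyl/aoc21 | solutions/10-2.py | find_completion_string
-- ===== SOURCE A (Python) =====
-- OPEN_CHUNK_CHARACTERS = set(["(", "[", "{", "<"])
--
-- CLOSE_CHUNK_CHARACTERS = set([")", "]", "}", ">"])
--
-- OPEN_CHUNK_TO_CLOSE_CHUNK = {
--     # comment to force black to format multiline
--     "(": ")",
--     "[": "]",
--     "{": "}",
--     "<": ">",
-- }
--
-- CLOSE_CHUNK_TO_OPEN_CHUNK = {
--     # comment to force black to format multiline
--     ")": "(",
--     "]": "[",
--     "}": "{",
--     ">": "<",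
-- }
--
-- def find_completion_string(line: str) -> str | None:
--     open_chunks: list[str] = []
--     for c in line:
--         if c in OPEN_CHUNK_CHARACTERS:
--             open_chunks.append(c)
--         elif c in CLOSE_CHUNK_CHARACTERS:
--             open_chunk = open_chunks.pop() if open_chunks else None
--             if CLOSE_CHUNK_TO_OPEN_CHUNK[c] != open_chunk:
--                 # Corrupt line cannot be completed
--                 return None
--     return "".join(OPEN_CHUNK_TO_CLOSE_CHUNK[c] for c in open_chunks[::-1])
-- ===== SOURCE B (Python) =====
-- def find_completion_string(line: str) -> str | None:
--     # Reduce to a fixed point: repeatedly cancel adjacent matching bracket pairs.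
--     pairs = ("()", "[]", "{}", "<>")
--     s = [c for c in line if c in "()[]{}<>"]
--     changed = True
--     while changed:
--         out = []
--         i = 0
--         while i < len(s):
--             if i + 1 < len(s) and s[i] + s[i + 1] in pairs:
--                 i += 2
--             else:
--                 out.append(s[i])
--                 i += 1
--         changed = len(out) != len(s)
--         s = out
--     if any(c in ")]}>" for c in s):
--         return None
--     close = {"(": ")", "[": "]", "{": "}", "<": ">"}
--     return "".join(close[c] for c in reversed(s))
-- ===== Notes on version B (the rewrite author's own statement) =====
-- stated objective: alternative
-- what changed: Replaced A's explicit stack scan with fixed-point reduction: filter to bracket characters, repeatedly cancel adjacent matching pairs until nothing changes, report None iff a closing bracket survives, else map the surviving opens (reversed) to their closers.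
import Mathlib
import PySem

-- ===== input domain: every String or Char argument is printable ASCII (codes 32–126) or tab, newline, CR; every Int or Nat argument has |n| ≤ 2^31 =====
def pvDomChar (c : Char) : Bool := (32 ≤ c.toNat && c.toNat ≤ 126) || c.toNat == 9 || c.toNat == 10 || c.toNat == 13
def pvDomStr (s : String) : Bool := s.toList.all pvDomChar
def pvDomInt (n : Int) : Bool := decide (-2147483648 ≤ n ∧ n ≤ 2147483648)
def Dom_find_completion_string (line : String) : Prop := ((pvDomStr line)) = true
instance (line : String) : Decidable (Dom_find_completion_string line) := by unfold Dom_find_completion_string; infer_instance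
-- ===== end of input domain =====

-- B replaces A's explicit stack scan by cancel-adjacent-pairs-to-a-fixed-point reduction; same return value, no speed claim.

-- ===== PORT A =====
def pvAOpenSet : List Char := ['(', '[', '{', '<']
def pvACloseSet : List Char := [')', ']', '}', '>']
-- CLOSE_CHUNK_TO_OPEN_CHUNK[c]; returns Option so that 'some o ≠ openChunk' mirrors Python's '!=' against a possibly-None open_chunk (the key is always present when looked up: c is a close char)
def pvCloseToOpen (c : Char) : Option Char :=
  PySem.Dict.get? (PySem.Dict.ofList [(')', '('), (']', '['), ('}', '{'), ('>', '<')]) c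
-- OPEN_CHUNK_TO_CLOSE_CHUNK[c]; exact because A only applies it to stack elements, which are open brackets (keys present), so the default is never used
def pvOpenToClose (c : Char) : Char :=
  PySem.Dict.getD (PySem.Dict.ofList [('(', ')'), ('[', ']'), ('{', '}'), ('<', '>')]) c '?'

-- A's for-loop with early return: open_chunks is the Python list (top at the end)
def pvScanA : List Char → List Char → Option (List Char)
  | [], st => some st
  | c :: cs, st =>
    if c ∈ pvAOpenSet then pvScanA cs (st ++ [c])
    else if c ∈ pvACloseSet then
      let openChunk : Option Char := if st.isEmpty then none else st.getLast?
      let st' := st.dropLast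
      if pvCloseToOpen c ≠ openChunk then none else pvScanA cs st'
    else pvScanA cs st

def find_completion_string (line : String) : Option String :=
  (pvScanA line.toList []).map (fun st => String.ofList (st.reverse.map pvOpenToClose))

-- ===== PORT B =====
def pvIsOpen (c : Char) : Bool := c = '(' || c = '[' || c = '{' || c = '<'
def pvIsClose (c : Char) : Bool := c = ')' || c = ']' || c = '}' || c = '>'
def pvPair (x y : Char) : Bool :=
  (x = '(' && y = ')') || (x = '[' && y = ']') || (x = '{' && y = '}') || (x = '<' && y = '>')
def pvCloseOf (c : Char) : Char :=
  PySem.Dict.getD (PySem.Dict.ofList [('(', ')'), ('[', ']'), ('{', '}'), ('<', '>')]) c '?'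

-- one left-to-right cancelling pass (the inner while loop of Source B)
def pvReduceOnce : List Char → List Char
  | x :: y :: rest => if pvPair x y then pvReduceOnce rest else x :: pvReduceOnce (y :: rest)
  | l => l

-- needed by pvReduceFix's termination proof
theorem pvReduceOnce_length_le (l : List Char) : (pvReduceOnce l).length ≤ l.length := by
  induction l using pvReduceOnce.induct with
  | case1 x y rest hp ih => simp only [pvReduceOnce, if_pos hp]; simp; omega
  | case2 x y rest hp ih => simp only [pvReduceOnce, if_neg hp]; simp at ih ⊢; omega
  | case3 l h =>
    cases l with
    | nil => simp [pvReduceOnce]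
    | cons a t =>
      cases t with
      | nil => simp [pvReduceOnce]
      | cons b u => exact absurd rfl (fun hh => h a b u hh)

-- the outer while loop of Source B: repeat the pass until it changes nothing (lengths equal)
def pvReduceFix (l : List Char) : List Char :=
  if (pvReduceOnce l).length = l.length then l else pvReduceFix (pvReduceOnce l)
termination_by l.length
decreasing_by have := pvReduceOnce_length_le l; omega

def find_completion_string_alt (line : String) : Option String :=
  let s := line.toList.filter (fun c => pvIsOpen c || pvIsClose c)
  let r := pvReduceFix s
  if r.any pvIsClose then none
  else some (String.ofList (r.reverse.map pvCloseOf))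

-- ===== PRECONDITION & SPEC =====
def Spec_find_completion_string (line : String) (out : Option String) : Prop := out = find_completion_string_alt line
instance (line : String) (out : Option String) : Decidable (Spec_find_completion_string line out) := by unfold Spec_find_completion_string; infer_instance

-- ===== CLAIM (what is proved, stated in full; the proofs are below) =====
def Claim_equal_find_completion_string : Prop := ∀ (line : String), Dom_find_completion_string line → Spec_find_completion_string line (find_completion_string line)

-- ===== LEMMAS AND PROOFS =====

theorem scan_cons (c : Char) (cs st : List Char) :
    pvScanA (c :: cs) st =
      if c ∈ pvAOpenSet then pvScanA cs (st ++ [c])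
      else if c ∈ pvACloseSet then
        if pvCloseToOpen c ≠ (if st.isEmpty then none else st.getLast?) then none
        else pvScanA cs st.dropLast
      else pvScanA cs st := rfl

theorem mem_open_iff (c : Char) : c ∈ pvAOpenSet ↔ pvIsOpen c = true := by
  simp [pvAOpenSet, pvIsOpen]; tauto

theorem mem_close_iff (c : Char) : c ∈ pvACloseSet ↔ pvIsClose c = true := by
  simp [pvACloseSet, pvIsClose]; tauto

-- scanning ignores non-bracket characters
theorem scan_filter (l : List Char) (st : List Char) :
    pvScanA (l.filter (fun c => pvIsOpen c || pvIsClose c)) st = pvScanA l st := by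
  induction l generalizing st with
  | nil => rfl
  | cons c cs ih =>
    by_cases ho : pvIsOpen c = true
    · have h1 : c ∈ pvAOpenSet := (mem_open_iff c).2 ho
      simp [List.filter, ho, scan_cons, h1, ih]
    · by_cases hc : pvIsClose c = true
      · have h1 : c ∉ pvAOpenSet := fun h => ho ((mem_open_iff c).1 h)
        have h2 : c ∈ pvACloseSet := (mem_close_iff c).2 hc
        simp only [List.filter, ho, hc, Bool.false_or, scan_cons]
        simp only [h1, if_false, h2, if_pos]
        split_ifs <;> first | rfl | exact ih _
      · have h1 : c ∉ pvAOpenSet := fun h => ho ((mem_open_iff c).1 h)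
        have h2 : c ∉ pvACloseSet := fun h => hc ((mem_close_iff c).1 h)
        simp [List.filter, ho, hc, scan_cons, h1, h2, ih]

theorem pair_facts {x y : Char} (h : pvPair x y = true) :
    x ∈ pvAOpenSet ∧ y ∈ pvACloseSet ∧ pvCloseToOpen y = some x := by
  simp only [pvPair, Bool.or_eq_true, Bool.and_eq_true, decide_eq_true_eq] at h
  rcases h with ((⟨hx, hy⟩ | ⟨hx, hy⟩) | ⟨hx, hy⟩) | ⟨hx, hy⟩ <;> subst hx <;> subst hy <;> decide

-- cancelling one pass does not change the scan result
theorem scan_reduceOnce (l : List Char) (st : List Char) :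
    pvScanA (pvReduceOnce l) st = pvScanA l st := by
  induction l using pvReduceOnce.induct generalizing st with
  | case1 x y rest hp ih =>
    obtain ⟨hx, hy, hcl⟩ := pair_facts hp
    have hyc : pvIsClose y = true := (mem_close_iff y).1 hy
    have hyo : y ∉ pvAOpenSet := by
      intro hmem
      have hmo := (mem_open_iff y).1 hmem
      simp only [pvIsOpen, pvIsClose, Bool.or_eq_true, decide_eq_true_eq] at hmo hyc
      rcases hyc with ((h | h) | h) | h <;> subst h <;> simp at hmo
    rw [pvReduceOnce, if_pos hp, ih, scan_cons, if_pos hx, scan_cons, if_neg hyo, if_pos hy]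
    have hne : (st ++ [x]).isEmpty = false := by simp
    simp [hne, hcl, List.getLast?_append]
  | case2 x y rest hp ih =>
    rw [pvReduceOnce, if_neg hp, scan_cons, scan_cons]
    split_ifs <;> first | rfl | exact ih _
  | case3 l h =>
    cases l with
    | nil => rfl
    | cons a t =>
      cases t with
      | nil => rfl
      | cons b u => exact absurd rfl (fun hh => h a b u hh)

theorem reduceOnce_eq_of_length {l : List Char} (h : (pvReduceOnce l).length = l.length) :
    pvReduceOnce l = l := by
  induction l using pvReduceOnce.induct with
  | case1 x y rest hp ih =>
    exfalso
    have := pvReduceOnce_length_le rest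
    rw [pvReduceOnce, if_pos hp] at h
    simp at h; omega
  | case2 x y rest hp ih =>
    rw [pvReduceOnce, if_neg hp] at h ⊢
    simp at h
    rw [ih h]
  | case3 l hl =>
    cases l with
    | nil => rfl
    | cons a t =>
      cases t with
      | nil => rfl
      | cons b u => exact absurd rfl (fun hh => hl a b u hh)

theorem reduceFix_scan (l : List Char) (st : List Char) :
    pvScanA (pvReduceFix l) st = pvScanA l st := by
  induction l using pvReduceFix.induct with
  | case1 l h => rw [pvReduceFix, if_pos h]
  | case2 l h ih => rw [pvReduceFix, if_neg h, ih, scan_reduceOnce]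

theorem reduceFix_fixed (l : List Char) : pvReduceOnce (pvReduceFix l) = pvReduceFix l := by
  induction l using pvReduceFix.induct with
  | case1 l h => rw [pvReduceFix, if_pos h]; exact reduceOnce_eq_of_length h
  | case2 l h ih => rw [pvReduceFix, if_neg h]; exact ih

theorem reduceOnce_subset' (l : List Char) : ∀ c : Char, c ∈ pvReduceOnce l → c ∈ l := by
  induction l using pvReduceOnce.induct with
  | case1 x y rest hp ih =>
    intro c hm
    rw [pvReduceOnce, if_pos hp] at hm
    simp [ih c hm]
  | case2 x y rest hp ih =>
    intro c hm
    rw [pvReduceOnce, if_neg hp, List.mem_cons] at hm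
    rcases hm with hm | hm
    · simp [hm]
    · have := ih c hm; simp at this ⊢; tauto
  | case3 l hl =>
    intro c hm
    cases l with
    | nil => exact hm
    | cons a t =>
      cases t with
      | nil => exact hm
      | cons b u => exact absurd rfl (fun hh => hl a b u hh)

theorem reduceOnce_subset {l : List Char} {c : Char} (hm : c ∈ pvReduceOnce l) : c ∈ l :=
  reduceOnce_subset' l c hm

theorem reduceFix_subset' (l : List Char) : ∀ c : Char, c ∈ pvReduceFix l → c ∈ l := by
  induction l using pvReduceFix.induct with
  | case1 l hl => intro c hm; rwa [pvReduceFix, if_pos hl] at hm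
  | case2 l hl ih =>
    intro c hm
    rw [pvReduceFix, if_neg hl] at hm
    exact reduceOnce_subset (ih c hm)

theorem reduceFix_subset {l : List Char} {c : Char} (hm : c ∈ pvReduceFix l) : c ∈ l :=
  reduceFix_subset' l c hm

-- a fixed point of pvReduceOnce has no adjacent matching pair
theorem chain_of_fixed {l : List Char} (h : pvReduceOnce l = l) :
    List.IsChain (fun a b => pvPair a b = false) l := by
  induction l using pvReduceOnce.induct with
  | case1 x y rest hp ih =>
    exfalso
    have hle := pvReduceOnce_length_le rest
    have hlen := congrArg List.length h
    rw [pvReduceOnce, if_pos hp] at hlen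
    simp at hlen; omega
  | case2 x y rest hp ih =>
    rw [pvReduceOnce, if_neg hp, List.cons.injEq] at h
    exact List.IsChain.cons_cons (by simpa using hp) (ih h.2)
  | case3 l hl =>
    cases l with
    | nil => exact List.isChain_nil
    | cons a t =>
      cases t with
      | nil => exact List.isChain_singleton a
      | cons b u => exact absurd rfl (fun hh => hl a b u hh)

-- pushing a run of open brackets
theorem scan_opens (os : List Char) (ho : ∀ c ∈ os, pvIsOpen c = true) (l st : List Char) :
    pvScanA (os ++ l) st = pvScanA l (st ++ os) := by
  induction os generalizing st with
  | nil => simp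
  | cons o os ih =>
    have h1 : o ∈ pvAOpenSet := (mem_open_iff o).2 (ho o (by simp))
    rw [List.cons_append, scan_cons, if_pos h1, ih (fun c hc => ho c (by simp [hc]))]
    simp

theorem close_mismatch {o c : Char} (ho : pvIsOpen o = true) (hc : pvIsClose c = true)
    (hp : pvPair o c = false) : pvCloseToOpen c ≠ some o := by
  simp only [pvIsOpen, Bool.or_eq_true, decide_eq_true_eq] at ho
  simp only [pvIsClose, Bool.or_eq_true, decide_eq_true_eq] at hc
  rcases ho with ((h | h) | h) | h <;> subst h <;>
    rcases hc with ((h | h) | h) | h <;> subst h <;> revert hp <;> decide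

-- scanning a close char whose (possibly absent) stack top does not match: corrupt
theorem scan_close_none {c : Char} (hc : pvIsClose c = true) (st : List Char)
    (hm : pvCloseToOpen c ≠ (if st.isEmpty then none else st.getLast?)) (l : List Char) :
    pvScanA (c :: l) st = none := by
  have h1 : c ∉ pvAOpenSet := by
    intro hmem; rw [mem_open_iff] at hmem
    simp only [pvIsClose, Bool.or_eq_true, decide_eq_true_eq] at hc
    rcases hc with ((h | h) | h) | h <;> subst h <;> simp [pvIsOpen] at hmem
  have h2 : c ∈ pvACloseSet := (mem_close_iff c).2 hc
  rw [scan_cons, if_neg h1, if_pos h2, if_pos hm]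

theorem closeToOpen_isSome {c : Char} (hc : pvIsClose c = true) :
    ∃ o, pvCloseToOpen c = some o := by
  simp only [pvIsClose, Bool.or_eq_true, decide_eq_true_eq] at hc
  rcases hc with ((h | h) | h) | h <;> subst h <;> exact ⟨_, rfl⟩

-- bracket-only fixed point: scan from the empty stack is none iff a close char survives
theorem scan_irreducible (r : List Char)
    (hb : ∀ c ∈ r, (pvIsOpen c || pvIsClose c) = true)
    (hch : List.IsChain (fun a b => pvPair a b = false) r) :
    pvScanA r [] = if r.any pvIsClose then none else some r := by
  by_cases hany : r.any pvIsClose = true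
  · rw [if_pos hany]
    obtain ⟨r₁, c, r₂, hr, ho1, hc⟩ :
        ∃ r₁ c r₂, r = r₁ ++ c :: r₂ ∧ (∀ x ∈ r₁, pvIsOpen x = true) ∧ pvIsClose c = true := by
      clear hch
      induction r with
      | nil => simp at hany
      | cons a t ih =>
        by_cases ha : pvIsClose a = true
        · exact ⟨[], a, t, rfl, by simp, ha⟩
        · have hao : pvIsOpen a = true := by
            have := hb a (by simp); simp [ha] at this; exact this
          have hany' : t.any pvIsClose = true := by
            simp [List.any_cons, ha] at hany; simpa using hany
          obtain ⟨r₁, c, r₂, hr, ho1, hc⟩ :=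
            ih (fun x hx => hb x (by simp [hx])) hany'
          refine ⟨a :: r₁, c, r₂, by simp [hr], ?_, hc⟩
          intro x hx
          rcases List.mem_cons.1 hx with hx | hx
          · subst hx; exact hao
          · exact ho1 x hx
    subst hr
    rw [scan_opens r₁ ho1 _ []]
    simp only [List.nil_append]
    apply scan_close_none hc
    cases hlast : r₁.getLast? with
    | none =>
      have hnil : r₁ = [] := by cases r₁ <;> simp_all
      subst hnil
      obtain ⟨o, hoeq⟩ := closeToOpen_isSome hc
      simp [hoeq]
    | some o =>
      have hne : r₁ ≠ [] := by intro h; subst h; simp at hlast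
      have hemp : r₁.isEmpty = false := by simp [hne]
      rw [hemp]
      simp only [Bool.false_eq_true, if_false]
      have hoo : pvIsOpen o = true := ho1 o (List.mem_of_getLast? hlast)
      have hpc : pvPair o c = false := by
        rw [List.isChain_append] at hch
        exact hch.2.2 o hlast c (by simp)
      exact close_mismatch hoo hc hpc
  · rw [if_neg hany]
    have ho : ∀ c ∈ r, pvIsOpen c = true := by
      intro c hcr
      have h1 := hb c hcr
      have h2 : pvIsClose c ≠ true := fun h => hany (List.any_eq_true.2 ⟨c, hcr, h⟩)
      simp [h2] at h1; exact h1
    have := scan_opens r ho [] []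
    simpa using this

-- the master equality on character lists
theorem main_eq (l : List Char) :
    (pvScanA l []).map (fun st => String.ofList (st.reverse.map pvOpenToClose)) =
      (let r := pvReduceFix (l.filter (fun c => pvIsOpen c || pvIsClose c));
       if r.any pvIsClose then none else some (String.ofList (r.reverse.map pvCloseOf))) := by
  set f := l.filter (fun c => pvIsOpen c || pvIsClose c) with hf
  set r := pvReduceFix f with hrdef
  have hb : ∀ c ∈ r, (pvIsOpen c || pvIsClose c) = true := by
    intro c hc
    exact (List.mem_filter.1 (reduceFix_subset hc)).2
  have hch := chain_of_fixed (reduceFix_fixed f)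
  have h1 : pvScanA l [] = pvScanA r [] := by
    rw [← scan_filter l [], ← hf, ← reduceFix_scan f []]
  rw [h1, scan_irreducible r hb hch]
  by_cases hany : r.any pvIsClose = true
  · simp [hany]
  · simp only [hany, Bool.false_eq_true, if_false, Option.map_some]
    have hmap : r.reverse.map pvOpenToClose = r.reverse.map pvCloseOf := rfl
    rw [hmap]

-- ===== VERDICT (by name: the statement is the Claim_ definition above) =====
theorem find_completion_string_spec : Claim_equal_find_completion_string := by
  intro line _
  unfold Spec_find_completion_string find_completion_string find_completion_string_alt
  exact main_eq line.toList
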